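-- pv_equiv track=rewrite | github.com/wilmurillo-ai/Design-Assistant | .skills/openclaw-skills/skills/abedmir31/job-applications/scripts/tailor_resume.py | build_education
-- ===== SOURCE A (Python) =====
-- def escape_latex(text: str) -> str:
--     """Escape special LaTeX characters."""
--     if not text:
--         return ""
--     replacements = {
--         '&': r'\&',
--         '%': r'\%',
--         '$': r'\$',
--         '#': r'\#',
--         '_': r'\_',
--         '{': r'\{',
--         '}': r'\}',
--         '~': r'\textasciitilde{}',
--         '^': r'\^{}',
--     }
--     for char, replacement in replacements.items():
--         text = text.replace(char, replacement)
--     return text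
--
-- def build_education(education: list) -> str:
--     blocks = []
--     for edu in education:
--         block = f"\\textbf{{{escape_latex(edu.get('institution', ''))}}}\\hfill {escape_latex(edu.get('location', ''))}\\\\\\n"
--         block += f"{escape_latex(edu.get('studyType', ''))} {escape_latex(edu.get('area', ''))} \\hfill {escape_latex(edu.get('startDate', ''))} - {escape_latex(edu.get('endDate', ''))}\\\\\\n"
--         block += "\\vspace{2mm}"
--         blocks.append(block)
--     return "\n".join(blocks)
-- ===== SOURCE B (Python) =====
-- LATEX_REPLACEMENTS = {
--     '&': r'\&',
--     '%': r'\%',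
--     '$': r'\$',
--     '#': r'\#',
--     '_': r'\_',
--     '{': r'\{',
--     '}': r'\}',
--     '~': r'\textasciitilde{}',
--     '^': r'\^{}',
-- }
--
--
-- def escape_latex(text: str) -> str:
--     """Escape special LaTeX characters in a single left-to-right pass."""
--     if not text:
--         return ""
--     return ''.join(LATEX_REPLACEMENTS.get(c, c) for c in text)
--
--
-- def _format_entry(edu) -> str:
--     return (
--         f"\\textbf{{{escape_latex(edu.get('institution', ''))}}}\\hfill {escape_latex(edu.get('location', ''))}\\\\\\n"
--         f"{escape_latex(edu.get('studyType', ''))} {escape_latex(edu.get('area', ''))} \\hfill {escape_latex(edu.get('startDate', ''))} - {escape_latex(edu.get('endDate', ''))}\\\\\\n"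
--         "\\vspace{2mm}"
--     )
--
--
-- def build_education(education: list) -> str:
--     return "\n".join(_format_entry(edu) for edu in education)
-- ===== Notes on version B (the rewrite author's own statement) =====
-- stated objective: idiomatic
-- what changed: escape_latex is rewritten from nine sequential full-string str.replace passes to a single left-to-right per-character pass joining dict lookups, and build_education's accumulator loop becomes a join over a generator; equivalence rests on no replacement string containing a later-replaced key character.
import Mathlib
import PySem

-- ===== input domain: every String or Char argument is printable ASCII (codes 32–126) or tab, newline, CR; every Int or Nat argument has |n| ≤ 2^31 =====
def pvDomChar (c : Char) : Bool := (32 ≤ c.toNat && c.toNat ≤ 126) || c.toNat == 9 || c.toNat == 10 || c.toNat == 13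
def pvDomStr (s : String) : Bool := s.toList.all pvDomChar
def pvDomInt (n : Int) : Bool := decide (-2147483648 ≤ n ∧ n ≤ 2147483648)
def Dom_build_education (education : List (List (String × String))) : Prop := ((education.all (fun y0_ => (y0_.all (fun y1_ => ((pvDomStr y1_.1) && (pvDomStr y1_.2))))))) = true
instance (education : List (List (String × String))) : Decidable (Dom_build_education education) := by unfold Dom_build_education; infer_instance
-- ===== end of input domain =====

-- B rewrites escape_latex as one left-to-right per-character pass (dict lookup per char)
-- instead of A's nine sequential whole-string replace passes; return values are identical.

-- dict.get(k, '') on the edu dict (association list, first match), shared by both ports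
def pyGetStr (d : List (String × String)) (k : String) : String :=
  match d.find? (fun p => p.1 == k) with
  | some p => p.2
  | none => ""

-- ===== PORT A =====
-- the `replacements` dict of A's escape_latex, iterated in insertion order
def escape_latex_repl : List (String × String) :=
  [("&", "\\&"), ("%", "\\%"), ("$", "\\$"), ("#", "\\#"), ("_", "\\_"),
   ("{", "\\{"), ("}", "\\}"), ("~", "\\textasciitilde{}"), ("^", "\\^{}")]

def escape_latex (text : String) : String :=
  if text = "" then ""
  else escape_latex_repl.foldl (fun t cr => PySem.Str.replace t cr.1 cr.2) text

def build_education (education : List (List (String × String))) : String :=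
  let blocks := education.foldl (fun blocks edu =>
    blocks ++ ["\\textbf{" ++ escape_latex (pyGetStr edu "institution") ++ "}\\hfill "
      ++ escape_latex (pyGetStr edu "location") ++ "\\\\\\n"
      ++ escape_latex (pyGetStr edu "studyType") ++ " " ++ escape_latex (pyGetStr edu "area")
      ++ " \\hfill " ++ escape_latex (pyGetStr edu "startDate") ++ " - "
      ++ escape_latex (pyGetStr edu "endDate") ++ "\\\\\\n"
      ++ "\\vspace{2mm}"]) []
  PySem.Str.join "\n" blocks

-- ===== PORT B =====
-- B's module-level LATEX_REPLACEMENTS dict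
def latex_replacements : PySem.Dict String String :=
  PySem.Dict.mk [("&", "\\&"), ("%", "\\%"), ("$", "\\$"), ("#", "\\#"), ("_", "\\_"),
    ("{", "\\{"), ("}", "\\}"), ("~", "\\textasciitilde{}"), ("^", "\\^{}")]

def escape_latex_alt (text : String) : String :=
  if text = "" then ""
  else PySem.Str.join ""
    (text.toList.map (fun c =>
      PySem.Dict.getD latex_replacements (String.ofList [c]) (String.ofList [c])))

def format_entry (edu : List (String × String)) : String :=
  "\\textbf{" ++ escape_latex_alt (pyGetStr edu "institution") ++ "}\\hfill "
    ++ escape_latex_alt (pyGetStr edu "location") ++ "\\\\\\n"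
    ++ escape_latex_alt (pyGetStr edu "studyType") ++ " " ++ escape_latex_alt (pyGetStr edu "area")
    ++ " \\hfill " ++ escape_latex_alt (pyGetStr edu "startDate") ++ " - "
    ++ escape_latex_alt (pyGetStr edu "endDate") ++ "\\\\\\n"
    ++ "\\vspace{2mm}"

def build_education_alt (education : List (List (String × String))) : String :=
  PySem.Str.join "\n" (education.map format_entry)

-- ===== PRECONDITION & SPEC =====
def Spec_build_education (education : List (List (String × String))) (out : String) : Prop := out = build_education_alt education
instance (education : List (List (String × String))) (out : String) : Decidable (Spec_build_education education out) := by unfold Spec_build_education; infer_instance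

-- ===== CLAIM (what is proved, stated in full; the proofs are below) =====
def Claim_equal_build_education : Prop := ∀ (education : List (List (String × String))), Dom_build_education education → Spec_build_education education (build_education education)

-- ===== LEMMAS AND PROOFS =====

-- one replacement step as a per-character function
def fRep (p : Char) (new : List Char) (c : Char) : List Char := if c = p then new else [c]

theorem go_single (p : Char) (new : List Char) :
    ∀ (l acc : List Char), PySem.Chars.replace.go [p] new l.length l acc
      = acc.reverse ++ l.flatMap (fRep p new) := by
  intro l
  induction l with
  | nil => intro acc; simp [PySem.Chars.replace.go]
  | cons c t ih =>
    intro acc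
    simp only [List.length_cons, PySem.Chars.replace.go, List.isPrefixOf]
    by_cases h : c = p
    · subst h
      simp only [beq_self_eq_true, Bool.true_and, if_pos]
      simp [List.drop, ih, fRep]
    · have hb : (p == c) = false := by simp [Ne.symm h]
      simp [hb, ih, fRep, h]

-- replacing a single-character pattern is a per-character flatMap
theorem replace_single (p : Char) (new : List Char) (l : List Char) :
    PySem.Chars.replace l [p] new = l.flatMap (fRep p new) := by
  simp [PySem.Chars.replace, go_single]

-- joining on the empty separator is flatten
theorem join_empty (ps : List (List Char)) : PySem.Chars.join [] ps = ps.flatten := by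
  simp only [PySem.Chars.join]
  induction ps with
  | nil => simp [List.intercalate]
  | cons a t ih =>
    cases t with
    | nil => simp [List.intercalate]
    | cons b r =>
      simp only [List.intercalate, List.intersperse] at *
      simp_all

-- A's nine-step replacement chain, restricted to one character
def chainF (c : Char) : List Char :=
  (fRep '&' ("\\&".toList) c).flatMap fun c1 =>
  (fRep '%' ("\\%".toList) c1).flatMap fun c2 =>
  (fRep '$' ("\\$".toList) c2).flatMap fun c3 =>
  (fRep '#' ("\\#".toList) c3).flatMap fun c4 =>
  (fRep '_' ("\\_".toList) c4).flatMap fun c5 =>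
  (fRep '{' ("\\{".toList) c5).flatMap fun c6 =>
  (fRep '}' ("\\}".toList) c6).flatMap fun c7 =>
  (fRep '~' ("\\textasciitilde{}".toList) c7).flatMap
  (fRep '^' ("\\^{}".toList))

-- B's per-character replacement
def escChar (c : Char) : List Char :=
  (PySem.Dict.getD latex_replacements (String.ofList [c]) (String.ofList [c])).toList

theorem key_ne (k c : Char) (h : c ≠ k) : (String.ofList [k] == String.ofList [c]) = false := by
  simp [String.ext_iff]
  intro h2
  exact h (by simpa using h2.symm)

theorem per_char (c : Char) : chainF c = escChar c := by
  by_cases h1 : c = '&'; · subst h1; decide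
  by_cases h2 : c = '%'; · subst h2; decide
  by_cases h3 : c = '$'; · subst h3; decide
  by_cases h4 : c = '#'; · subst h4; decide
  by_cases h5 : c = '_'; · subst h5; decide
  by_cases h6 : c = '{'; · subst h6; decide
  by_cases h7 : c = '}'; · subst h7; decide
  by_cases h8 : c = '~'; · subst h8; decide
  by_cases h9 : c = '^'; · subst h9; decide
  have e1 := key_ne '&' c h1; have e2 := key_ne '%' c h2; have e3 := key_ne '$' c h3
  have e4 := key_ne '#' c h4; have e5 := key_ne '_' c h5; have e6 := key_ne '{' c h6
  have e7 := key_ne '}' c h7; have e8 := key_ne '~' c h8; have e9 := key_ne '^' c h9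
  simp [chainF, escChar, fRep, h1, h2, h3, h4, h5, h6, h7, h8, h9,
    latex_replacements, PySem.Dict.getD, PySem.Dict.get?, Option.getD,
    e1, e2, e3, e4, e5, e6, e7, e8, e9]

theorem escape_eq (text : String) : escape_latex text = escape_latex_alt text := by
  unfold escape_latex escape_latex_alt
  split_ifs with h
  · rfl
  · have hA : (escape_latex_repl.foldl (fun t cr => PySem.Str.replace t cr.1 cr.2) text).toList
        = text.toList.flatMap chainF := by
      simp only [escape_latex_repl, List.foldl, PySem.Str.toList_replace]
      have p1 : "&".toList = ['&'] := rfl; have p2 : "%".toList = ['%'] := rfl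
      have p3 : "$".toList = ['$'] := rfl; have p4 : "#".toList = ['#'] := rfl
      have p5 : "_".toList = ['_'] := rfl; have p6 : "{".toList = ['{'] := rfl
      have p7 : "}".toList = ['}'] := rfl; have p8 : "~".toList = ['~'] := rfl
      have p9 : "^".toList = ['^'] := rfl
      rw [p1, p2, p3, p4, p5, p6, p7, p8, p9]
      simp only [replace_single, List.flatMap_assoc]
      rfl
    have hB : (PySem.Str.join ""
        (text.toList.map (fun c =>
          PySem.Dict.getD latex_replacements (String.ofList [c]) (String.ofList [c])))).toList
        = text.toList.flatMap escChar := by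
      simp only [PySem.Str.join, String.toList_ofList]
      have : ("" : String).toList = [] := rfl
      rw [this, join_empty, List.map_map, List.flatMap]
      rfl
    apply String.toList_injective
    rw [hA, hB]
    rw [show chainF = escChar from funext per_char]

-- ===== VERDICT (by name: the statement is the Claim_ definition above) =====
theorem build_education_spec : Claim_equal_build_education := by
  intro education _
  show build_education education = build_education_alt education
  unfold build_education build_education_alt
  rw [PySem.List.foldl_append_singleton_eq_map]
  simp only [List.nil_append, escape_eq]
  rfl
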